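-- pv_equiv track=rewrite | github.com/jin-sj/git_ci_test | koreantools/utils/korean_utils.py | get_replace_number_token
-- ===== SOURCE A (Python) =====
-- def get_replace_number_token(token: str) -> str:
--     """ Finds the desired original number annotation
--
--         Args:
--             token (str): Token to inspect
--
--         Returns:
--             Original number annotation
--     """
--     replace = ""
--     for char in token:
--         if char == '(':
--             continue
--         elif char == ')':
--             break
--         replace += char
--     return replace
-- ===== SOURCE B (Python) =====
-- def get_replace_number_token(token: str) -> str:
--     """ Finds the desired original number annotation (cut-then-filter version). """
--     return token.split(')')[0].replace('(', '')
-- ===== Notes on version B (the rewrite author's own statement) =====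
-- stated objective: idiomatic
-- what changed: Replaces the fused per-character loop (skip open-paren, break at close-paren) with two whole-string passes: cut the prefix before the first close-paren via split's first element, then delete every open-paren via replace.
import Mathlib
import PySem

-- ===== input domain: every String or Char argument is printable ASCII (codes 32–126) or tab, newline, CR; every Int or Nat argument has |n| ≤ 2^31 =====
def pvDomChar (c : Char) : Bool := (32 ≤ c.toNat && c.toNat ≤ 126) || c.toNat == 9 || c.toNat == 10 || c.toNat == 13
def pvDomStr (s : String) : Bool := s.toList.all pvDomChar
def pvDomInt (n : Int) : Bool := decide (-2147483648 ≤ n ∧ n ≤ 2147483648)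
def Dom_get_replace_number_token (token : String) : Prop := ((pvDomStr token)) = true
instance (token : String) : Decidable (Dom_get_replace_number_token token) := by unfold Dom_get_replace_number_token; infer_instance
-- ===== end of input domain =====

-- B replaces A's fused per-character loop (skip '(', break at ')') by two
-- whole-string passes: cut before the first ')' with split(')')[0], then delete
-- every '(' with replace — more idiomatic, same linear cost.

-- ===== PORT A =====
-- the for-loop with its string accumulator `replace`
def getReplaceLoopA : List Char → String → String
  | [], replace => replace
  | c :: rest, replace =>
    if c = '(' then getReplaceLoopA rest replace            -- continue
    else if c = ')' then replace                            -- break, then return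
    else getReplaceLoopA rest (replace.push c)              -- replace += char

def get_replace_number_token (token : String) : String :=
  getReplaceLoopA token.toList ""

-- ===== PORT B =====
-- token.split(')')[0].replace('(', '')   (split(')') never returns an empty list, so [0] = head)
def get_replace_number_token_alt (token : String) : String :=
  PySem.Str.replace (((PySem.Str.split? token ")").getD []).headD "") "(" ""

-- ===== PRECONDITION & SPEC =====
def Spec_get_replace_number_token (token : String) (out : String) : Prop := out = get_replace_number_token_alt token
instance (token : String) (out : String) : Decidable (Spec_get_replace_number_token token out) := by unfold Spec_get_replace_number_token; infer_instance

-- ===== CLAIM (what is proved, stated in full; the proofs are below) =====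
def Claim_equal_get_replace_number_token : Prop := ∀ (token : String), Dom_get_replace_number_token token → Spec_get_replace_number_token token (get_replace_number_token token)

-- ===== LEMMAS AND PROOFS =====

-- A's loop produces acc ++ (filter (≠ '(') ∘ takeWhile (≠ ')')) of the remaining characters.
theorem getReplaceLoopA_toList (l : List Char) : ∀ (acc : String),
    (getReplaceLoopA l acc).toList = acc.toList ++ ((l.takeWhile (· ≠ ')')).filter (· ≠ '(')) := by
  induction l with
  | nil => intro acc; simp [getReplaceLoopA]
  | cons c rest ih =>
    intro acc
    by_cases h1 : c = '('
    · simp [getReplaceLoopA, h1, ih]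
    · by_cases h2 : c = ')'
      · simp [getReplaceLoopA, h2]
      · simp [getReplaceLoopA, h1, h2, ih, String.toList_push]

-- splitOn.go with a general accumulator prepends acc.reverse.
theorem splitOnGo_acc (sep : List Char) : ∀ (fuel : Nat) (l cur : List Char) (acc : List (List Char)),
    PySem.Chars.splitOn.go sep fuel l cur acc =
      acc.reverse ++ PySem.Chars.splitOn.go sep fuel l cur [] := by
  intro fuel
  induction fuel with
  | zero => intro l cur acc; simp [PySem.Chars.splitOn.go]
  | succ f ih =>
    intro l cur acc
    cases l with
    | nil => simp [PySem.Chars.splitOn.go]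
    | cons c rest =>
      rw [PySem.Chars.splitOn.go, PySem.Chars.splitOn.go]
      split_ifs with h
      · rw [ih _ _ (cur.reverse :: acc), ih _ _ [cur.reverse]]
        simp
      · exact ih _ _ acc

-- the first piece of a split on ')' is takeWhile (· ≠ ')').
theorem splitOnGo_head : ∀ (l : List Char) (fuel : Nat) (cur : List Char), l.length < fuel →
    ∃ rest, PySem.Chars.splitOn.go [')'] fuel l cur [] =
      (cur.reverse ++ l.takeWhile (· ≠ ')')) :: rest := by
  intro l
  induction l with
  | nil =>
    intro fuel cur h
    cases fuel with
    | zero => omega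
    | succ f => exact ⟨[], by simp [PySem.Chars.splitOn.go]⟩
  | cons c rest ih =>
    intro fuel cur h
    cases fuel with
    | zero => omega
    | succ f =>
      rw [PySem.Chars.splitOn.go]
      by_cases hc : c = ')'
      · have hpre : List.isPrefixOf [')'] (c :: rest) = true := by simp [hc, List.isPrefixOf]
        rw [if_pos hpre, splitOnGo_acc]
        refine ⟨PySem.Chars.splitOn.go [')'] f (List.drop [')'].length (c :: rest)) [] [], ?_⟩
        simp [hc]
      · have hpre : List.isPrefixOf [')'] (c :: rest) = false := by
          simp [List.isPrefixOf]; exact fun hh => (hc hh.symm).elim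
        rw [if_neg (by simp [hpre])]
        obtain ⟨r, hr⟩ := ih f (c :: cur) (by simpa using Nat.lt_of_succ_lt_succ h)
        refine ⟨r, ?_⟩
        rw [hr]
        simp [hc]

-- replace with single-char old '(' and empty new is filter (· ≠ '(').
theorem replaceGo_filter : ∀ (l : List Char) (fuel : Nat) (acc : List Char), l.length ≤ fuel →
    PySem.Chars.replace.go ['('] [] fuel l acc = acc.reverse ++ l.filter (· ≠ '(') := by
  intro l
  induction l with
  | nil =>
    intro fuel acc _
    cases fuel <;> simp [PySem.Chars.replace.go]
  | cons c t ih =>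
    intro fuel acc h
    cases fuel with
    | zero => simp at h
    | succ f =>
      rw [PySem.Chars.replace.go]
      by_cases hc : c = '('
      · have hpre : List.isPrefixOf ['('] (c :: t) = true := by simp [hc, List.isPrefixOf]
        rw [if_pos hpre]
        have hdrop : List.drop ['('].length (c :: t) = t := by simp
        rw [hdrop, List.reverse_nil, List.nil_append, ih f _ (by simpa using Nat.le_of_succ_le_succ h)]
        simp [hc]
      · have hpre : List.isPrefixOf ['('] (c :: t) = false := by
          simp [List.isPrefixOf]; exact fun hh => (hc hh.symm).elim
        rw [if_neg (by simp [hpre]), ih f _ (by simpa using Nat.le_of_succ_le_succ h)]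
        simp [hc]

-- ===== VERDICT (by name: the statement is the Claim_ definition above) =====
theorem get_replace_number_token_spec : Claim_equal_get_replace_number_token := by
  intro token _
  unfold Spec_get_replace_number_token get_replace_number_token get_replace_number_token_alt
  -- B's head of split(')')
  obtain ⟨rest, hsplit⟩ := splitOnGo_head token.toList (token.toList.length + 1) [] (by omega)
  have hsplitOn : PySem.Chars.splitOn token.toList [')'] =
      (token.toList.takeWhile (· ≠ ')')) :: rest := by
    simpa [PySem.Chars.splitOn] using hsplit
  have hsplit? : PySem.Str.split? token ")" =
      some (String.ofList (token.toList.takeWhile (· ≠ ')')) :: rest.map String.ofList) := by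
    simp [PySem.Str.split?, PySem.Chars.split?, hsplitOn]
  rw [← String.toList_inj, hsplit?]
  simp only [Option.getD_some, List.headD_cons, PySem.Str.toList_replace, String.toList_ofList]
  have hrep : PySem.Chars.replace (token.toList.takeWhile (· ≠ ')')) ['('] [] =
      (token.toList.takeWhile (· ≠ ')')).filter (· ≠ '(') := by
    rw [PySem.Chars.replace]
    simp only [List.isEmpty_cons, if_false, Bool.false_eq_true]
    exact replaceGo_filter _ _ [] le_rfl
  simp only [ne_eq, decide_not] at hrep
  simp [getReplaceLoopA_toList, hrep]
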